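-- pv_equiv track=rewrite | github.com/hjh0915/toronto_assignments | fall-a3-2017/network_functions.py | invert_network
-- ===== SOURCE A (Python) =====
-- from typing import List, Tuple, Dict, TextIO
--
-- def invert_network(person_to_networks: Dict[str, List[str]]) -> Dict[str, List[str]]:
--     """
--     Return a "network to people" dictionary based on the given "person to
--     networks" dictionary.
--     """
--     d = {}
--     k = list(person_to_networks)
--     v = list(person_to_networks.values())
--     # 遍历将每个 value 标上数字，便于判断索引位置
--     s = []
--     for i, j in enumerate(v):
--         for x in j:
--             s.append((i, x))
--     # 通过索引数字找key, 放到字典中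
--     for x0, x1 in s:
--         if x1 not in d:
--             d[x1] = [k[x0]]
--         else:
--             d[x1].append(k[x0])
--     return d
-- ===== SOURCE B (Python) =====
-- def invert_network(person_to_networks):
--     """
--     Return a "network to people" dictionary based on the given "person to
--     networks" dictionary.
--     """
--     d = {}
--     for person, networks in person_to_networks.items():
--         for net in networks:
--             d.setdefault(net, []).append(person)
--     return d
-- ===== Notes on version B (the rewrite author's own statement) =====
-- stated objective: simpler
-- what changed: Single direct pass over items() with setdefault-append, replacing A's key/value parallel lists, intermediate (index, network) pair table and second index-lookup pass.
import Mathlib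
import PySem

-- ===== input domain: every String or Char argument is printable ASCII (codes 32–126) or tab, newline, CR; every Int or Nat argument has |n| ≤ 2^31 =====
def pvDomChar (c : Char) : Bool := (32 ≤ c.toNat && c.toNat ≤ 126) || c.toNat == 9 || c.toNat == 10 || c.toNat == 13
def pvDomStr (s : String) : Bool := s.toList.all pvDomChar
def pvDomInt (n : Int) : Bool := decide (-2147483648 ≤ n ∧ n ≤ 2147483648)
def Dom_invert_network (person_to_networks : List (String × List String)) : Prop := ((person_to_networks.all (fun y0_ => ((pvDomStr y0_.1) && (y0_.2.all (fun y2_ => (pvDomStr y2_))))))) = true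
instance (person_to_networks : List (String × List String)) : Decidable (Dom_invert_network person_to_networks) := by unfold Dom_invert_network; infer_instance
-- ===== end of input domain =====

-- B replaces A's parallel key/value lists, (index, network) pair table and second
-- index-lookup pass by one direct setdefault-append pass over the items (simpler).

-- ===== PORT A =====
-- d[x1].append(k[x0]) on a present key is overwrite-in-place: insert with the looked-up
-- list extended; k[x0] is ported as pyGetD (the index comes from enumerate, always in range).
def invert_network (person_to_networks : List (String × List String)) : List (String × List String) :=
  let d : PySem.Dict String (List String) := PySem.Dict.empty
  let k : List String := person_to_networks.map Prod.fst
  let v : List (List String) := person_to_networks.map Prod.snd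
  let s : List (Int × String) :=
    (PySem.List.enumerate v).foldl
      (fun s ij => ij.2.foldl (fun s x => s ++ [(ij.1, x)]) s) []
  let d := s.foldl
    (fun d x =>
      if d.contains x.2 = false then
        d.insert x.2 [PySem.List.pyGetD k x.1 ""]
      else
        d.insert x.2 (d.getD x.2 [] ++ [PySem.List.pyGetD k x.1 ""])) d
  d.items

-- ===== PORT B =====
-- d.setdefault(net, []).append(person): ensure the key, then overwrite-in-place with the
-- looked-up list extended.
def invert_network_alt (person_to_networks : List (String × List String)) : List (String × List String) :=
  (person_to_networks.foldl
    (fun d pn => pn.2.foldl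
      (fun d net =>
        let d' := d.setdefault net []
        d'.insert net (d'.getD net [] ++ [pn.1])) d)
    (PySem.Dict.empty : PySem.Dict String (List String))).items

-- ===== PRECONDITION & SPEC =====
def Spec_invert_network (person_to_networks : List (String × List String)) (out : List (String × List String)) : Prop := out = invert_network_alt person_to_networks
instance (person_to_networks : List (String × List String)) (out : List (String × List String)) : Decidable (Spec_invert_network person_to_networks out) := by unfold Spec_invert_network; infer_instance

-- ===== CLAIM (what is proved, stated in full; the proofs are below) =====
def Claim_equal_invert_network : Prop := ∀ (person_to_networks : List (String × List String)), Dom_invert_network person_to_networks → Spec_invert_network person_to_networks (invert_network person_to_networks)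

-- ===== LEMMAS AND PROOFS =====

-- the common canonical step both programs' per-(key,person) steps reduce to
def pvStep (d : PySem.Dict String (List String)) (key person : String) : PySem.Dict String (List String) :=
  d.insert key (d.getD key [] ++ [person])

lemma stepA_eq (d : PySem.Dict String (List String)) (key person : String) :
    (if d.contains key = false then d.insert key [person]
     else d.insert key (d.getD key [] ++ [person])) = pvStep d key person := by
  unfold pvStep
  by_cases h : d.contains key = false
  · simp [PySem.Dict.getD_of_not_contains, h]
  · simp [h]

lemma stepB_eq (d : PySem.Dict String (List String)) (key person : String) :
    (let d' := d.setdefault key [];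
     d'.insert key (d'.getD key [] ++ [person])) = pvStep d key person := by
  unfold pvStep
  by_cases h : d.contains key
  · simp [PySem.Dict.setdefault_of_contains, h]
  · have h' : d.contains key = false := by simpa using h
    simp [PySem.Dict.setdefault_of_not_contains, h',
      PySem.Dict.getD_insert_self, PySem.Dict.insert_insert_self,
      PySem.Dict.getD_of_not_contains]

-- A's pair-table fold (over the flattened (index, network) list) equals the fused B fold
lemma foldA_shift (vs : List (String × List String)) :
    ∀ (k : List String) (n : Int) (d : PySem.Dict String (List String)),
    (∀ j : Nat, (hj : j < vs.length) → PySem.List.pyGetD k (n + (j : Int)) "" = vs[j].1) →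
    ((PySem.List.enumerate (vs.map Prod.snd) n).flatMap
        (fun ij => ij.2.map (fun x => (ij.1, x)))).foldl
      (fun d (x : Int × String) => pvStep d x.2 (PySem.List.pyGetD k x.1 "")) d
    = vs.foldl (fun d pn => pn.2.foldl (fun d net => pvStep d net pn.1) d) d := by
  induction vs with
  | nil => intro k n d h; simp [PySem.List.enumerate_nil]
  | cons pn rest ih =>
    intro k n d h
    have h0 : PySem.List.pyGetD k n "" = pn.1 := by
      have := h 0 (by simp)
      simpa using this
    simp only [List.map_cons, PySem.List.enumerate_cons, List.flatMap_cons,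
      List.foldl_append, List.foldl_map, List.foldl_cons]
    rw [h0]
    exact ih k (n + 1)
      (pn.2.foldl (fun d net => pvStep d net pn.1) d)
      (by
        intro j hj
        have := h (j + 1) (by simpa using Nat.succ_lt_succ hj)
        simpa [add_assoc, add_comm, add_left_comm] using this)

theorem invert_network_spec : Claim_equal_invert_network := by
  intro p _
  unfold Spec_invert_network invert_network invert_network_alt
  dsimp only
  congr 1
  -- rewrite both per-element steps to the canonical step
  have hA : (fun (d : PySem.Dict String (List String)) (x : Int × String) =>
      if d.contains x.2 = false then
        d.insert x.2 [PySem.List.pyGetD (p.map Prod.fst) x.1 ""]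
      else
        d.insert x.2 (d.getD x.2 [] ++ [PySem.List.pyGetD (p.map Prod.fst) x.1 ""]))
      = (fun d x => pvStep d x.2 (PySem.List.pyGetD (p.map Prod.fst) x.1 "")) := by
    funext d x; exact stepA_eq d x.2 _
  have hB : (fun (d : PySem.Dict String (List String)) (pn : String × List String) =>
      pn.2.foldl (fun d net =>
        let d' := d.setdefault net []
        d'.insert net (d'.getD net [] ++ [pn.1])) d)
      = (fun d pn => pn.2.foldl (fun d net => pvStep d net pn.1) d) := by
    funext d pn; congr 1; funext d net; exact stepB_eq d net pn.1
  rw [hA, hB]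
  -- A's s-building fold is the flatMap of the enumerate
  have hs : ((PySem.List.enumerate (p.map Prod.snd) 0).foldl
      (fun (s : List (Int × String)) ij => ij.2.foldl (fun s x => s ++ [(ij.1, x)]) s) [])
      = (PySem.List.enumerate (p.map Prod.snd) 0).flatMap
          (fun ij => ij.2.map (fun x => (ij.1, x))) := by
    have : ∀ (l : List (Int × List String)) (acc : List (Int × String)),
        l.foldl (fun s ij => ij.2.foldl (fun s x => s ++ [(ij.1, x)]) s) acc
        = acc ++ l.flatMap (fun ij => ij.2.map (fun x => (ij.1, x))) := by
      intro l
      induction l with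
      | nil => intro acc; simp
      | cons hd tl ih =>
        intro acc
        simp only [List.foldl_cons, ih, List.flatMap_cons, ← List.append_assoc]
        congr 1
        exact PySem.List.foldl_append_singleton_eq_map _ _ _ ▸ rfl
    simpa using this _ []
  rw [hs]
  exact foldA_shift p (p.map Prod.fst) 0 PySem.Dict.empty
    (by
      intro j hj
      have hj' : j < (p.map Prod.fst).length := by simpa using hj
      simp [PySem.List.pyGetD_natCast, List.getElem?_eq_getElem hj])
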